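-- pv_equiv track=rewrite | github.com/service84-io/ctcode | S84_CTCode_Transpiler_CSharpTranspiler_ctcode.py | ConvertVariable
-- ===== SOURCE A (Python) =====
-- def Length(input: str) -> int: return len(input)
--
-- def At(input: str, index: int) -> str: return input[index:index+1]
--
-- def Concat(left: str, right: str) -> str: return left + right
--
-- def ConvertVariable(variable: 'str') -> 'str':
--     result: 'str' = ""
--     variable_index: 'int' = 0
--     while variable_index<Length(variable):
--         character: 'str' = At(variable,variable_index)
--         if character==".":
--             result = Concat(result,"?")
--         result = Concat(result,character)
--         variable_index = variable_index+1
--     return result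
-- ===== SOURCE B (Python) =====
-- def ConvertVariable(variable: 'str') -> 'str':
--     return "?.".join(variable.split("."))
-- ===== Notes on version B (the rewrite author's own statement) =====
-- stated objective: idiomatic
-- what changed: B tokenizes the string by splitting on '.' and rejoins the segments with the separator '?.' in one expression, instead of A's index-driven character scan with conditional string concatenations.
import Mathlib
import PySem

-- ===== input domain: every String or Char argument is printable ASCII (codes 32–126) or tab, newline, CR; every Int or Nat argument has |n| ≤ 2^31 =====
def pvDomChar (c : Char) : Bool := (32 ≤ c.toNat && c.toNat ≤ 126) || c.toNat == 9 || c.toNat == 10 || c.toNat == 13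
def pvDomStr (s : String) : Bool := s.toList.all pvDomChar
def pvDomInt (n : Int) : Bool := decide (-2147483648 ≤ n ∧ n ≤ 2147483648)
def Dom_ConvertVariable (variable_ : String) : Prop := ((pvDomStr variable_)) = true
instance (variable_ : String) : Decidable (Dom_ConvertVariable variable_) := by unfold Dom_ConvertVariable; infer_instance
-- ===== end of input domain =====

-- ===== PORT A =====
-- A's while loop over character indices: at each position, if the character is '.'
-- append '?' to the result, then append the character itself.  Ported as the
-- obvious structural recursion over the remaining characters with the result
-- string (as List Char) as accumulator.
def convertVariableLoop : List Char → List Char → List Char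
  | [], result => result
  | c :: rest, result =>
      convertVariableLoop rest ((if c = '.' then result ++ ['?'] else result) ++ [c])

def ConvertVariable (variable_ : String) : String :=
  String.ofList (convertVariableLoop variable_.toList [])

-- ===== PORT B =====
-- B: "?.".join(variable.split(".")) — split on '.', rejoin with '?.'.
-- split('.') with a nonempty separator never fails; the none arm is unreachable.
def ConvertVariable_alt (variable_ : String) : String :=
  match PySem.Str.split? variable_ "." with
  | some parts => PySem.Str.join "?." parts
  | none => ""

-- ===== PRECONDITION & SPEC =====
def Spec_ConvertVariable (variable_ : String) (out : String) : Prop := out = ConvertVariable_alt variable_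
instance (variable_ : String) (out : String) : Decidable (Spec_ConvertVariable variable_ out) := by unfold Spec_ConvertVariable; infer_instance

-- ===== CLAIM (what is proved, stated in full; the proofs are below) =====
def Claim_equal_ConvertVariable : Prop := ∀ (variable_ : String), Dom_ConvertVariable variable_ → Spec_ConvertVariable variable_ (ConvertVariable variable_)

-- ===== LEMMAS AND PROOFS =====

/-- Per-character expansion: '.' becomes "?.", everything else is kept. -/
def convExpand (c : Char) : List Char := if c = '.' then ['?', '.'] else [c]

theorem convertVariableLoop_eq (cs res : List Char) :
    convertVariableLoop cs res = res ++ cs.flatMap convExpand := by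
  induction cs generalizing res with
  | nil => simp [convertVariableLoop]
  | cons c rest ih =>
      simp only [convertVariableLoop, ih, List.flatMap_cons, convExpand]
      by_cases h : c = '.' <;> simp [h]

/-- The segments that splitOn on ['.'] produces, as a clean recursion. -/
def convSegs : List Char → List Char → List (List Char)
  | [], cur => [cur.reverse]
  | c :: rest, cur =>
      if c = '.' then cur.reverse :: convSegs rest [] else convSegs rest (c :: cur)

theorem splitOn_go_eq (fuel : Nat) :
    ∀ (l cur : List Char) (acc : List (List Char)), l.length < fuel →
      PySem.Chars.splitOn.go ['.'] fuel l cur acc = acc.reverse ++ convSegs l cur := by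
  induction fuel with
  | zero => intro l cur acc h; omega
  | succ fuel ih =>
      intro l cur acc h
      cases l with
      | nil =>
          rw [PySem.Chars.splitOn.go.eq_def]
          simp [convSegs]
      | cons c rest =>
          rw [PySem.Chars.splitOn.go.eq_def]
          simp only [List.isPrefixOf, Bool.and_true]
          by_cases hc : c = '.'
          · subst hc
            simp only [beq_self_eq_true, if_pos, List.length_singleton, List.drop_one,
              List.tail_cons, convSegs]
            rw [ih rest [] (cur.reverse :: acc) (by simpa using Nat.lt_of_succ_lt_succ h)]
            simp
          · have : ('.' == c) = false := by simp [beq_eq_false_iff_ne]; exact fun e => hc e.symm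
            simp only [this, Bool.false_eq_true, if_false, convSegs, hc]
            exact ih rest (c :: cur) acc (by simpa using Nat.lt_of_succ_lt_succ h)

theorem convSegs_ne_nil (l cur : List Char) : convSegs l cur ≠ [] := by
  induction l generalizing cur with
  | nil => simp [convSegs]
  | cons c rest ih =>
      by_cases h : c = '.' <;> simp [convSegs, h, ih]

theorem intercalate_cons_of_ne_nil {α : Type} (sep x : List α) (parts : List (List α))
    (h : parts ≠ []) :
    List.intercalate sep (x :: parts) = x ++ sep ++ List.intercalate sep parts := by
  cases parts with
  | nil => exact absurd rfl h
  | cons y ys => simp [List.intercalate, List.intersperse]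

theorem join_convSegs (l : List Char) : ∀ cur,
    PySem.Chars.join ['?', '.'] (convSegs l cur) = cur.reverse ++ l.flatMap convExpand := by
  induction l with
  | nil => intro cur; simp [convSegs, PySem.Chars.join, List.intercalate]
  | cons c rest ih =>
      intro cur
      by_cases h : c = '.'
      · subst h
        simp only [convSegs, if_true, PySem.Chars.join]
        rw [intercalate_cons_of_ne_nil _ _ _ (convSegs_ne_nil rest [])]
        have := ih []
        simp only [PySem.Chars.join] at this
        simp [this, convExpand]
      · simp only [convSegs, h, if_false]
        rw [ih (c :: cur)]
        simp [convExpand, h]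

theorem splitOn_dot_eq (cs : List Char) :
    PySem.Chars.splitOn cs ['.'] = convSegs cs [] := by
  unfold PySem.Chars.splitOn
  rw [splitOn_go_eq (cs.length + 1) cs [] [] (Nat.lt_succ_self _)]
  simp

-- ===== VERDICT (by name: the statement is the Claim_ definition above) =====
theorem ConvertVariable_spec : Claim_equal_ConvertVariable := by
  intro v _
  show ConvertVariable v = ConvertVariable_alt v
  unfold ConvertVariable ConvertVariable_alt
  simp only [PySem.Str.split?, PySem.Chars.split?]
  have hsep : (".".toList.isEmpty) = false := by decide
  simp only [hsep, Bool.false_eq_true, if_false]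
  simp only [PySem.Str.join]
  congr 1
  rw [convertVariableLoop_eq]
  have hdot : (".".toList) = ['.'] := by decide
  rw [hdot, splitOn_dot_eq]
  have hsepj : ("?.".toList) = ['?', '.'] := by decide
  rw [hsepj]
  have := join_convSegs v.toList []
  simp only [List.reverse_nil, List.nil_append] at this
  rw [← this]
  simp only [PySem.Chars.join, List.map_map, List.nil_append]
  have hmap : List.map (String.toList ∘ String.ofList) (convSegs v.toList []) =
      convSegs v.toList [] := by simp [Function.comp_def]
  rw [hmap]
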